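-- pv_equiv track=rewrite | github.com/dimitrijepesic/hackupc | backend/ir_compiler/ir_compiler_v3.py | _extract_access_level
-- ===== SOURCE A (Python) =====
-- _ACCESS_KEYWORDS = ("open", "public", "internal", "fileprivate", "private")
--
-- def _extract_access_level(signature: str) -> str:
--     """
--     Derive visibility from the signature text.  Swift's default is "internal",
--     so only explicit keywords override it.
--     """
--     # Strip leading whitespace/newlines and check the first word
--     sig = signature.lstrip()
--     for kw in _ACCESS_KEYWORDS:
--         # Match "public func", "private(set) var", etc.
--         if sig.startswith(kw):
--             # Ensure it's a full token (not "internalize")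
--             rest = sig[len(kw):]
--             if not rest or not rest[0].isalpha():
--                 return kw
--     return "internal"
-- ===== SOURCE B (Python) =====
-- def _extract_access_level(signature: str) -> str:
--     # Scan by index: skip leading whitespace, then take the maximal alphabetic
--     # run as the first word; return it if it is an access keyword.
--     i = 0
--     while i < len(signature) and signature[i].isspace():
--         i += 1
--     j = i
--     while j < len(signature) and signature[j].isalpha():
--         j += 1
--     word = signature[i:j]
--     if word in ("open", "public", "internal", "fileprivate", "private"):
--         return word
--     return "internal"
-- ===== Notes on version B (the rewrite author's own statement) =====
-- stated objective: alternative
-- what changed: Replaces A's per-keyword startswith loop (with token-boundary check per keyword) by a single index scan that first extracts the leading word (skip whitespace, take the maximal alphabetic run) and then one membership test against the keyword tuple.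
import Mathlib
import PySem

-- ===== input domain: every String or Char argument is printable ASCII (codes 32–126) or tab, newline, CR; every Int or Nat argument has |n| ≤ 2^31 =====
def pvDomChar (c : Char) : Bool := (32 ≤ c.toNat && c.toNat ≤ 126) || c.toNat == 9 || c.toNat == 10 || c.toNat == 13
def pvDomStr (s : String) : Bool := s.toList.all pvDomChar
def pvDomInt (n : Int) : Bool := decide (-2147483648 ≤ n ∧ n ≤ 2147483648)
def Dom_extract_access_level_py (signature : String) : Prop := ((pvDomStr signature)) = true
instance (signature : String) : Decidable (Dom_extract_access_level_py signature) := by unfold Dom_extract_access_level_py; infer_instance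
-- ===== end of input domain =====

-- B replaces A's per-keyword startswith loop by a single index scan extracting the
-- leading word, then one keyword membership test; objective: alternative.

-- ===== PORT A =====
-- _ACCESS_KEYWORDS = ("open", "public", "internal", "fileprivate", "private")
def aAccessKeywords : List (List Char) :=
  [['o','p','e','n'], ['p','u','b','l','i','c'], ['i','n','t','e','r','n','a','l'], ['f','i','l','e','p','r','i','v','a','t','e'], ['p','r','i','v','a','t','e']]

-- the 'for kw in _ACCESS_KEYWORDS' loop with its early returns
def aLoop (sig : List Char) : List (List Char) → String
  | [] => "internal"
  | kw :: kws =>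
    if PySem.Chars.startswith sig kw = true then
      -- rest = sig[len(kw):]
      match PySem.List.slice sig (some (kw.length : Int)) none with
      | [] => String.mk kw                                   -- 'not rest'
      | c :: _ =>
        if PySem.Chars.isalpha c = false then String.mk kw   -- 'not rest[0].isalpha()'
        else aLoop sig kws
    else aLoop sig kws

def extract_access_level_py (signature : String) : String :=
  aLoop (PySem.Str.lstrip signature).toList aAccessKeywords

-- ===== PORT B =====
-- 'while i < len(signature) and signature[i].isspace(): i += 1' as a scan over the remaining chars
def bSkipWS : List Char → List Char
  | [] => []
  | c :: t => if PySem.Chars.isspace c then bSkipWS t else c :: t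

-- 'while j < len(signature) and signature[j].isalpha(): j += 1' plus the slice signature[i:j]
def bWord : List Char → List Char
  | [] => []
  | c :: t => if PySem.Chars.isalpha c then c :: bWord t else []

def extract_access_level_py_alt (signature : String) : String :=
  let word := String.mk (bWord (bSkipWS signature.toList))
  if word ∈ (["open", "public", "internal", "fileprivate", "private"] : List String) then word
  else "internal"

-- ===== PRECONDITION & SPEC =====
def Spec_extract_access_level_py (signature : String) (out : String) : Prop := out = extract_access_level_py_alt signature
instance (signature : String) (out : String) : Decidable (Spec_extract_access_level_py signature out) := by unfold Spec_extract_access_level_py; infer_instance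

-- ===== CLAIM (what is proved, stated in full; the proofs are below) =====
def Claim_equal_extract_access_level_py : Prop := ∀ (signature : String), Dom_extract_access_level_py signature → Spec_extract_access_level_py signature (extract_access_level_py signature)

-- ===== LEMMAS AND PROOFS =====

theorem takeWhile_append_all {α : Type} (p : α → Bool) (l r : List α)
    (h : ∀ c ∈ l, p c = true) :
    (l ++ r).takeWhile p = l ++ r.takeWhile p := by
  induction l with
  | nil => simp
  | cons a t ih =>
    simp only [List.cons_append, List.takeWhile_cons, h a (by simp)]
    simp [ih (fun c hc => h c (by simp [hc]))]

-- A's branch condition for one keyword is exactly 'the first alphabetic token equals that keyword'.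
theorem token_eq_iff (sig kw : List Char) (hne : kw ≠ [])
    (halpha : ∀ c ∈ kw, PySem.Chars.isalpha c = true) :
    (kw <+: sig ∧ (sig.drop kw.length = [] ∨
      ∃ c t, sig.drop kw.length = c :: t ∧ PySem.Chars.isalpha c = false))
    ↔ sig.takeWhile PySem.Chars.isalpha = kw := by
  constructor
  · rintro ⟨⟨r, hr⟩, hbd⟩
    subst hr
    have hdrop : (kw ++ r).drop kw.length = r := by simp
    rw [hdrop] at hbd
    rw [takeWhile_append_all _ _ _ halpha]
    rcases hbd with h0 | ⟨c, t, hct, hc⟩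
    · subst h0; simp
    · subst hct; simp [List.takeWhile_cons, hc]
  · intro ht
    have hpre : kw <+: sig := by rw [← ht]; exact List.takeWhile_prefix _
    obtain ⟨r, hr⟩ := hpre
    refine ⟨⟨r, hr⟩, ?_⟩
    have hdrop : sig.drop kw.length = r := by rw [← hr]; simp
    rw [← hr, takeWhile_append_all _ _ _ halpha] at ht
    have hrt : r.takeWhile PySem.Chars.isalpha = [] := by
      have h2 : kw ++ r.takeWhile PySem.Chars.isalpha = kw ++ [] := by simpa using ht
      exact List.append_cancel_left h2
    cases hrw : r with
    | nil => exact Or.inl (hdrop.trans hrw)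
    | cons c t =>
      right
      refine ⟨c, t, hdrop.trans hrw, ?_⟩
      rw [hrw, List.takeWhile_cons] at hrt
      by_cases hc : PySem.Chars.isalpha c = true
      · simp [hc] at hrt
      · simpa using hc

theorem aLoop_eq (sig : List Char) (kws : List (List Char))
    (h : ∀ kw ∈ kws, kw ≠ [] ∧ ∀ c ∈ kw, PySem.Chars.isalpha c = true) :
    aLoop sig kws =
      if sig.takeWhile PySem.Chars.isalpha ∈ kws then String.mk (sig.takeWhile PySem.Chars.isalpha)
      else "internal" := by
  induction kws with
  | nil => simp [aLoop]
  | cons kw kws ih =>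
    obtain ⟨hne, halpha⟩ := h kw (by simp)
    have ih' := ih (fun k hk => h k (by simp [hk]))
    have hiff := token_eq_iff sig kw hne halpha
    rw [aLoop]
    have hslice : PySem.List.slice sig (some (kw.length : Int)) none = sig.drop kw.length :=
      PySem.List.slice_from_natCast sig kw.length
    by_cases hsw : PySem.Chars.startswith sig kw = true
    · have hpre : kw <+: sig := (PySem.Chars.startswith_iff sig kw).mp hsw
      rw [if_pos hsw, hslice]
      cases hd : sig.drop kw.length with
      | nil =>
        have htok : sig.takeWhile PySem.Chars.isalpha = kw := hiff.mp ⟨hpre, Or.inl hd⟩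
        simp [htok]
      | cons c t =>
        by_cases hc : PySem.Chars.isalpha c = false
        · have htok : sig.takeWhile PySem.Chars.isalpha = kw := hiff.mp ⟨hpre, Or.inr ⟨c, t, hd, hc⟩⟩
          simp [hc, htok]
        · have hc' : PySem.Chars.isalpha c = true := by simpa using hc
          have htok : sig.takeWhile PySem.Chars.isalpha ≠ kw := by
            intro he
            rcases (hiff.mpr he).2 with h0 | ⟨c', t', hct, hcf⟩
            · rw [hd] at h0; exact (List.cons_ne_nil _ _) h0
            · rw [hd] at hct
              injection hct with h1 _
              rw [← h1] at hcf
              simp [hc'] at hcf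
          rw [ih']
          by_cases hm : List.takeWhile PySem.Chars.isalpha sig ∈ kws
          · simp [hc', hm]
          · simp [hc', hm, htok]
    · have htok : sig.takeWhile PySem.Chars.isalpha ≠ kw := by
        intro he
        exact hsw ((PySem.Chars.startswith_iff sig kw).mpr (by rw [← he]; exact List.takeWhile_prefix _))
      rw [if_neg hsw, ih']
      simp [List.mem_cons, htok]

-- B's whitespace scan computes dropWhile isspace.
theorem bSkipWS_eq (l : List Char) : bSkipWS l = l.dropWhile PySem.Chars.isspace := by
  induction l with
  | nil => rfl
  | cons c t ih =>
    rw [bSkipWS, List.dropWhile_cons]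
    by_cases hc : PySem.Chars.isspace c = true <;> simp [hc, ih]

-- B's word scan computes takeWhile isalpha.
theorem bWord_eq (l : List Char) : bWord l = l.takeWhile PySem.Chars.isalpha := by
  induction l with
  | nil => rfl
  | cons c t ih =>
    rw [bWord, List.takeWhile_cons]
    by_cases hc : PySem.Chars.isalpha c = true <;> simp [hc, ih]

-- membership of String.mk t in the String keyword list ↔ membership of t in A's char-list keywords
theorem mk_mem_keywords_iff (t : List Char) :
    (String.mk t ∈ (["open", "public", "internal", "fileprivate", "private"] : List String))
    ↔ t ∈ aAccessKeywords := by
  have hinj : ∀ u : List Char, String.mk t = String.mk u ↔ t = u := by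
    intro u
    constructor
    · intro h; exact String.ofList_inj.mp h
    · intro h; rw [h]
  simp only [aAccessKeywords, List.mem_cons, List.not_mem_nil, or_false]
  constructor
  · rintro (h | h | h | h | h) <;>
      [exact Or.inl ((hinj _).mp h); exact Or.inr (Or.inl ((hinj _).mp h));
       exact Or.inr (Or.inr (Or.inl ((hinj _).mp h)));
       exact Or.inr (Or.inr (Or.inr (Or.inl ((hinj _).mp h))));
       exact Or.inr (Or.inr (Or.inr (Or.inr ((hinj _).mp h))))]
  · rintro (h | h | h | h | h) <;> subst h <;> decide

-- ===== VERDICT (by name: the statement is the Claim_ definition above) =====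
theorem extract_access_level_py_spec : Claim_equal_extract_access_level_py := by
  intro signature _
  unfold Spec_extract_access_level_py extract_access_level_py extract_access_level_py_alt
  have hls : (PySem.Str.lstrip signature).toList
      = signature.toList.dropWhile PySem.Chars.isspace := by
    simp [PySem.Str.toList_lstrip]; rfl
  rw [hls, aLoop_eq _ _ (by
    intro kw hkw
    fin_cases hkw <;> exact ⟨by simp, by intro c hc; fin_cases hc <;> rfl⟩)]
  rw [bSkipWS_eq, bWord_eq]
  set t := (signature.toList.dropWhile PySem.Chars.isspace).takeWhile PySem.Chars.isalpha
  by_cases hm : t ∈ aAccessKeywords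
  · simp [hm, (mk_mem_keywords_iff t).mpr hm]
  · have : ¬ String.mk t ∈ (["open", "public", "internal", "fileprivate", "private"] : List String) :=
      fun h => hm ((mk_mem_keywords_iff t).mp h)
    simp [hm, this]
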